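-- pv_equiv track=rewrite | github.com/stefanvodita/pumping-lemma-calculator | main.py | merge_powers
-- ===== SOURCE A (Python) =====
-- def merge_powers(powers):
-- 	"""
-- 	There is no point in having w = [('a', 1), ('a', 1)],
-- 	when we could have w = [('a', 2)].
-- 	"""
--
-- 	# delete powers with exponent 0
-- 	non_redundant_powers = []
-- 	for power in powers:
-- 		if power[1] != 0:
-- 			non_redundant_powers.append(power)
-- 	powers = non_redundant_powers
--
-- 	# merge
-- 	merged_powers = []
-- 	i = 0
-- 	while i < len(powers):
-- 		base = powers[i][0]
-- 		power = powers[i][1]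
-- 		i += 1
-- 		while i < len(powers) and base == powers[i][0]:
-- 			power += powers[i][1]
-- 			i += 1
-- 		merged_powers.append((base, power))
-- 	return merged_powers
-- ===== SOURCE B (Python) =====
-- def merge_powers(powers):
-- 	merged = []
-- 	for base, exp in powers:
-- 		if exp == 0:
-- 			continue
-- 		if merged and merged[-1][0] == base:
-- 			merged[-1] = (base, merged[-1][1] + exp)
-- 		else:
-- 			merged.append((base, exp))
-- 	return merged
-- ===== Notes on version B (the rewrite author's own statement) =====
-- stated objective: simpler
-- what changed: Replaced A's two passes (zero-filter pass, then an index-based outer loop with a nested lookahead while) by one accumulator pass that skips zeros inline and merges each element backward into the last entry of the result.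
import Mathlib
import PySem

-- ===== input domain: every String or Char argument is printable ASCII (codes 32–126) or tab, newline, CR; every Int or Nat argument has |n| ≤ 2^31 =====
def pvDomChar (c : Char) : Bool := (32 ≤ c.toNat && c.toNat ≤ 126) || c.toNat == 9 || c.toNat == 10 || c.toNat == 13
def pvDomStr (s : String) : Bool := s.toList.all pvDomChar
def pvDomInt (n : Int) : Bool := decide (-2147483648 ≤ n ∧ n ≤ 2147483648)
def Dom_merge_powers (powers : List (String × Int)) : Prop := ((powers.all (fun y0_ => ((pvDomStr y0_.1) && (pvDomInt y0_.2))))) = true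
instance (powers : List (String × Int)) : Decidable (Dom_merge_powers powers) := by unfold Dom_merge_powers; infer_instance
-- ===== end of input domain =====

-- B replaces A's two passes (zero-filter, then index loop with nested lookahead while)
-- by a single accumulator pass merging backward into the last result entry (objective: simpler).

-- ===== PORT A =====
-- inner `while i < len(powers) and base == powers[i][0]` loop: accumulates the
-- exponent over the run of equal bases, returns the sum and the remaining list
def mpTakeSame (base : String) (power : Int) : List (String × Int) → Int × List (String × Int)
  | [] => (power, [])
  | (b', e') :: rest =>
      if base = b' then mpTakeSame base (power + e') rest
      else (power, (b', e') :: rest)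

theorem mpTakeSame_len (base : String) (power : Int) (l : List (String × Int)) :
    (mpTakeSame base power l).2.length ≤ l.length := by
  induction l generalizing power with
  | nil => simp [mpTakeSame]
  | cons hd tl ih =>
      obtain ⟨b', e'⟩ := hd
      simp only [mpTakeSame]
      split
      · exact le_trans (ih _) (Nat.le_succ _)
      · exact le_refl _

-- outer `while i < len(powers)` loop
def mpMergeLoop : List (String × Int) → List (String × Int)
  | [] => []
  | (base, power) :: rest =>
      let r := mpTakeSame base power rest
      (base, r.1) :: mpMergeLoop r.2
termination_by l => l.length
decreasing_by
  exact Nat.lt_succ_of_le (mpTakeSame_len base power rest)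

def merge_powers (powers : List (String × Int)) : List (String × Int) :=
  -- first loop: delete powers with exponent 0
  let non_redundant_powers :=
    powers.foldl (fun acc p => if p.2 ≠ 0 then acc ++ [p] else acc) []
  -- second loop: merge runs of equal bases
  mpMergeLoop non_redundant_powers

-- ===== PORT B =====
def mpStep (merged : List (String × Int)) (p : String × Int) : List (String × Int) :=
  if p.2 = 0 then merged
  else
    match merged.getLast? with
    | some (b', e') =>
        if b' = p.1 then merged.dropLast ++ [(p.1, e' + p.2)]
        else merged ++ [p]
    | none => merged ++ [p]

def merge_powers_alt (powers : List (String × Int)) : List (String × Int) :=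
  powers.foldl mpStep []

-- ===== PRECONDITION & SPEC =====
def Spec_merge_powers (powers : List (String × Int)) (out : List (String × Int)) : Prop := out = merge_powers_alt powers
instance (powers : List (String × Int)) (out : List (String × Int)) : Decidable (Spec_merge_powers powers out) := by unfold Spec_merge_powers; infer_instance

-- ===== CLAIM (what is proved, stated in full; the proofs are below) =====
def Claim_equal_merge_powers : Prop := ∀ (powers : List (String × Int)), Dom_merge_powers powers → Spec_merge_powers powers (merge_powers powers)

-- ===== LEMMAS AND PROOFS =====

-- mpStep without the zero guard
def mpStep' (merged : List (String × Int)) (p : String × Int) : List (String × Int) :=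
  match merged.getLast? with
  | some (b', e') =>
      if b' = p.1 then merged.dropLast ++ [(p.1, e' + p.2)]
      else merged ++ [p]
  | none => merged ++ [p]

theorem mpStep_eq (merged : List (String × Int)) (p : String × Int) :
    mpStep merged p = if p.2 = 0 then merged else mpStep' merged p := by
  simp [mpStep, mpStep']

-- A's filter loop is List.filter
theorem mpFilter_eq (powers acc : List (String × Int)) :
    powers.foldl (fun acc p => if p.2 ≠ 0 then acc ++ [p] else acc) acc
      = acc ++ powers.filter (fun p => p.2 ≠ 0) := by
  induction powers generalizing acc with
  | nil => simp
  | cons hd tl ih =>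
      rw [List.foldl_cons, List.filter_cons]
      by_cases h : hd.2 = 0
      · rw [if_neg (by simp [h]), if_neg (by simp [h]), ih]
      · rw [if_pos h, if_pos (by simp [h]), ih, List.append_assoc]
        rfl

-- B's fold skips zeros: it equals the mpStep' fold over the filtered list
theorem mpFold_filter (l acc : List (String × Int)) :
    l.foldl mpStep acc = (l.filter (fun p => p.2 ≠ 0)).foldl mpStep' acc := by
  induction l generalizing acc with
  | nil => rfl
  | cons hd tl ih =>
      simp only [List.foldl_cons, List.filter_cons, mpStep_eq]
      by_cases h : hd.2 = 0 <;> simp [h, ih]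

-- main invariant: folding mpStep' from an accumulator ending in (b, p)
theorem mpMain (l : List (String × Int)) (b : String) (p : Int)
    (pre : List (String × Int)) :
    l.foldl mpStep' (pre ++ [(b, p)])
      = pre ++ (b, (mpTakeSame b p l).1) :: mpMergeLoop (mpTakeSame b p l).2 := by
  induction l generalizing b p pre with
  | nil => simp [mpTakeSame, mpMergeLoop]
  | cons hd tl ih =>
      obtain ⟨b', e'⟩ := hd
      by_cases h : b = b'
      · subst h
        have hstep : mpStep' (pre ++ [(b, p)]) (b, e') = pre ++ [(b, p + e')] := by
          simp [mpStep']
        simp only [List.foldl_cons, hstep, mpTakeSame]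
        exact ih _ _ _
      · have hstep : mpStep' (pre ++ [(b, p)]) (b', e') = (pre ++ [(b, p)]) ++ [(b', e')] := by
          simp [mpStep', h]
        simp only [List.foldl_cons, hstep, mpTakeSame, if_neg h]
        rw [ih]
        simp [mpMergeLoop]

theorem mpFold_eq_mergeLoop (l : List (String × Int)) :
    l.foldl mpStep' [] = mpMergeLoop l := by
  cases l with
  | nil => simp [mpMergeLoop]
  | cons hd tl =>
      obtain ⟨b, e⟩ := hd
      have h0 : mpStep' [] (b, e) = [] ++ [(b, e)] := by simp [mpStep']
      simp only [List.foldl_cons, h0]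
      rw [mpMain]
      simp [mpMergeLoop]

-- ===== VERDICT (by name: the statement is the Claim_ definition above) =====
theorem merge_powers_spec : Claim_equal_merge_powers := by
  intro powers _
  unfold Spec_merge_powers merge_powers merge_powers_alt
  rw [mpFilter_eq, mpFold_filter, mpFold_eq_mergeLoop]
  simp
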